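-- pv_equiv track=rewrite | github.com/matirowensztein/practicas-ip | ROWEN/parciales/Parcial4.py | filas_validas
-- ===== SOURCE A (Python) =====
-- def repetido(l: list[int], n: int) -> bool:
--     cond: bool = False
--
--     for i in l:
--         if i == n:
--             cond = True
--
--     return cond
--
-- def filas_validas(m: list[list[int]]) -> bool:
--     f_cond: bool = True
--     new_f: list = []
--
--     for f in m:
--         if f_cond:
--             for n in f:
--                 if repetido(new_f, n) and n != 0:
--                     f_cond = False
--                 else:
--                     new_f.append(n)
--
--         new_f = []
--
--     return f_cond
-- ===== SOURCE B (Python) =====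
-- def filas_validas(m: list[list[int]]) -> bool:
--     return all(len(nz) == len(set(nz)) for nz in ([x for x in f if x != 0] for f in m))
-- ===== Notes on version B (the rewrite author's own statement) =====
-- stated objective: simpler
-- what changed: A validates each row by incrementally scanning an accumulator list for every element (repetido) and carrying a flag across rows; B filters each row's nonzero entries once and declares the row valid iff len(nonzeros) == len(set(nonzeros)), folded with all().
import Mathlib
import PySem

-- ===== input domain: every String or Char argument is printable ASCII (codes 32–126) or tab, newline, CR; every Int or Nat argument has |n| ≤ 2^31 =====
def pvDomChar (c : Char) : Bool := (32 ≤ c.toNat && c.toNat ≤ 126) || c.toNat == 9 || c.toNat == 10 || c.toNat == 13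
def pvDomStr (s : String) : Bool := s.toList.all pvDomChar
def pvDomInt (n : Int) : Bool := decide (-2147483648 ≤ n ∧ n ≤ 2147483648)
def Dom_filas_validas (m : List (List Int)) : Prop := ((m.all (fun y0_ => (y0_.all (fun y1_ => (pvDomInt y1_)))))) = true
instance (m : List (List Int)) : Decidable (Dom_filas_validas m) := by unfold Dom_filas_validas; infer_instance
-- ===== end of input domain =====

-- B replaces A's incremental membership-scan accumulator with a per-row filter-then-compare-cardinalities check (len(nonzeros) == len(set(nonzeros))); objective: simpler.

-- ===== PORT A =====
def repetido (l : List Int) (n : Int) : Bool :=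
  l.foldl (fun cond i => if i == n then true else cond) false

def filas_validas (m : List (List Int)) : Bool :=
  (m.foldl (fun (st : Bool × List Int) f =>
      let st' :=
        if st.1 then
          f.foldl (fun (s : Bool × List Int) n =>
            if repetido s.2 n && n != 0 then (false, s.2) else (s.1, s.2 ++ [n])) st
        else st
      (st'.1, ([] : List Int))) (true, ([] : List Int))).1

-- ===== PORT B =====
def filas_validas_alt (m : List (List Int)) : Bool :=
  m.all (fun f =>
    let nz := f.filter (fun x => x != 0)
    nz.length == (PySem.Set.ofList nz).length)

-- ===== PRECONDITION & SPEC =====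
def Spec_filas_validas (m : List (List Int)) (out : Bool) : Prop := out = filas_validas_alt m
instance (m : List (List Int)) (out : Bool) : Decidable (Spec_filas_validas m out) := by unfold Spec_filas_validas; infer_instance

-- ===== CLAIM (what is proved, stated in full; the proofs are below) =====
def Claim_equal_filas_validas : Prop := ∀ (m : List (List Int)), Dom_filas_validas m → Spec_filas_validas m (filas_validas m)

-- ===== LEMMAS AND PROOFS =====

-- repetido is a membership test
theorem repetido_aux (l : List Int) (n : Int) (b : Bool) :
    l.foldl (fun cond i => if i == n then true else cond) b = (b || l.contains n) := by
  induction l generalizing b with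
  | nil => simp
  | cons a l ih =>
    simp only [List.foldl_cons, List.contains_cons]
    split
    · rename_i h; rw [ih]; simp_all
    · rename_i h; rw [ih]
      have : (n == a) = false := by rw [beq_eq_false_iff_ne]; intro e; exact h (by simp [e.symm])
      simp [this]

theorem repetido_eq (l : List Int) (n : Int) : repetido l n = l.contains n := by
  unfold repetido; rw [repetido_aux]; simp

-- A's inner row loop, as a named step function (definitionally the lambda in the port)
def rowStep (s : Bool × List Int) (n : Int) : Bool × List Int :=
  if repetido s.2 n && n != 0 then (false, s.2) else (s.1, s.2 ++ [n])

theorem inner_false (f : List Int) (acc : List Int) :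
    (f.foldl rowStep (false, acc)).1 = false := by
  induction f generalizing acc with
  | nil => rfl
  | cons n f ih => simp only [List.foldl_cons, rowStep]; split; exact ih _; exact ih _

-- invariant of A's inner loop: starting true, it ends true iff the nonzero entries seen are all distinct
theorem inner_true (f acc : List Int) (h : (acc.filter (fun x => x != 0)).Nodup) :
    ((f.foldl rowStep (true, acc)).1 = true ↔ ((acc ++ f).filter (fun x => x != 0)).Nodup) := by
  induction f generalizing acc with
  | nil => simpa using h
  | cons n f ih =>
    simp only [List.foldl_cons, rowStep, repetido_eq]
    by_cases hn : n = 0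
    · subst hn
      simp only [List.contains_eq_mem]
      have step : (if (decide ((0:Int) ∈ acc) && (0 != (0:Int))) then (false, acc) else (true, acc ++ [0])) = (true, acc ++ [0]) := by simp
      rw [step]
      have hacc : ((acc ++ [(0:Int)]).filter (fun x => x != 0)).Nodup := by
        simpa using h
      rw [ih _ hacc]
      simp [List.append_assoc]
    · by_cases hm : n ∈ acc
      · have step : (if (decide (n ∈ acc) && (n != (0:Int))) then (false, acc) else (true, acc ++ [n])) = (false, acc) := by simp [hm, hn]
        simp only [List.contains_eq_mem, step, inner_false]
        constructor
        · intro hc; cases hc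
        · intro hnd
          exfalso
          have h2 : ¬ ((acc ++ n :: f).filter (fun x => x != 0)).Nodup := by
            rw [List.filter_append]
            have h1 : n ∈ acc.filter (fun x => x != 0) := by simp [hm, hn]
            have h3 : (List.filter (fun x => x != 0) (n :: f)) = n :: f.filter (fun x => x != 0) := by simp [hn]
            rw [h3]
            intro hnd2
            rw [List.nodup_append] at hnd2
            exact hnd2.2.2 n h1 n (List.mem_cons_self) rfl
          exact h2 hnd
      · have step : (if (decide (n ∈ acc) && (n != (0:Int))) then (false, acc) else (true, acc ++ [n])) = (true, acc ++ [n]) := by simp [hm]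
        simp only [List.contains_eq_mem, step]
        have hacc : ((acc ++ [n]).filter (fun x => x != 0)).Nodup := by
          rw [List.filter_append]
          have h3 : (List.filter (fun x => x != 0) [n]) = [n] := by simp [hn]
          rw [h3]
          rw [List.nodup_append]
          refine ⟨h, by simp, by intro a ha b hb; simp only [List.mem_singleton] at hb; subst hb; intro e; subst e; exact hm (List.mem_of_mem_filter ha)⟩
        rw [ih _ hacc]
        simp [List.append_assoc]

theorem set_len_le (l s : List Int) : (l.foldl PySem.Set.add s).length ≤ s.length + l.length := by
  induction l generalizing s with
  | nil => simp
  | cons a l ih =>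
    simp only [List.foldl_cons]
    calc (l.foldl PySem.Set.add (PySem.Set.add s a)).length
        ≤ (PySem.Set.add s a).length + l.length := ih _
      _ ≤ s.length + (a :: l).length := by
          simp only [PySem.Set.add, List.length_cons]; split
          · omega
          · simp; omega

-- set(xs) has as many elements as xs iff xs has no duplicates
theorem set_len_eq_iff (l s : List Int) (hs : s.Nodup) :
    ((l.foldl PySem.Set.add s).length = s.length + l.length ↔ (s ++ l).Nodup) := by
  induction l generalizing s with
  | nil => simpa using hs
  | cons a l ih =>
    simp only [List.foldl_cons]
    by_cases hc : a ∈ s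
    · have hadd : PySem.Set.add s a = s := by simp [PySem.Set.add, hc]
      rw [hadd]
      constructor
      · intro hlen
        exfalso
        have := set_len_le l s
        simp only [List.length_cons] at hlen
        omega
      · intro hnd
        exfalso
        rw [List.nodup_append] at hnd
        exact hnd.2.2 a hc a (List.mem_cons_self) rfl
    · have hadd : PySem.Set.add s a = s ++ [a] := by simp [PySem.Set.add, hc]
      rw [hadd]
      have hs' : (s ++ [a]).Nodup := by
        rw [List.nodup_append]
        refine ⟨hs, by simp, ?_⟩
        intro x hx b hb
        simp only [List.mem_singleton] at hb; subst hb
        intro e; subst e; exact hc hx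
      have hlen : s.length + (a :: l).length = (s ++ [a]).length + l.length := by
        simp; omega
      rw [hlen, ih _ hs']
      constructor
      · intro hnd
        have : (s ++ [a]) ++ l = s ++ a :: l := by simp
        rwa [this] at hnd
      · intro hnd
        have : (s ++ [a]) ++ l = s ++ a :: l := by simp
        rwa [this]

-- A's outer loop: the flag is an all-rows conjunction (each row restarts from (true, []))
theorem outer_fold (m : List (List Int)) (b : Bool) :
    (m.foldl (fun (st : Bool × List Int) f => ((if st.1 then f.foldl rowStep st else st).1, ([] : List Int))) (b, ([] : List Int))).1
      = (b && m.all (fun f => (f.foldl rowStep (true, ([] : List Int))).1)) := by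
  induction m generalizing b with
  | nil => simp
  | cons f m ih =>
    simp only [List.foldl_cons, List.all_cons]
    cases b
    · simp only [Bool.false_eq_true, ite_false, ih, Bool.false_and]
    · simp only [ite_true, ih, Bool.true_and]

theorem portA_eq (m : List (List Int)) :
    filas_validas m = (m.foldl (fun (st : Bool × List Int) f => ((if st.1 then f.foldl rowStep st else st).1, ([] : List Int))) (true, ([] : List Int))).1 := rfl

-- one row of A agrees with one row of B
theorem row_eq (f : List Int) :
    (f.foldl rowStep (true, ([] : List Int))).1
      = ((f.filter (fun x => x != 0)).length == (PySem.Set.ofList (f.filter (fun x => x != 0))).length) := by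
  rw [Bool.eq_iff_iff]
  rw [inner_true f [] (by simp)]
  simp only [List.nil_append]
  rw [beq_iff_eq]
  have hof : PySem.Set.ofList (f.filter (fun x => x != 0)) = (f.filter (fun x => x != 0)).foldl PySem.Set.add [] := PySem.Set.ofList_eq_foldl _
  rw [hof]
  have := set_len_eq_iff (f.filter (fun x => x != 0)) [] (by simp)
  simp only [List.length_nil, Nat.zero_add, List.nil_append] at this
  rw [← this]
  omega

-- ===== VERDICT (by name: the statement is the Claim_ definition above) =====
theorem filas_validas_spec : Claim_equal_filas_validas := by
  intro m _
  unfold Spec_filas_validas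
  rw [portA_eq, outer_fold]
  unfold filas_validas_alt
  simp only [Bool.true_and, row_eq]
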